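-- pv_equiv track=rewrite | github.com/tsenoner/dset_3FTx | dset_3ftx/uniprot_helper.py | _get_start_end_idx
-- ===== SOURCE A (Python) =====
-- def _get_start_end_idx(seq_idx):
--     """Sort indices and remove any consecutive idx that increase by one
--
--     Those indices mean that the sequence is consecutive
--     """
--     seq_idx = sorted(seq_idx) + [None]
--     new_idx = []
--     skip_flag = False
--     for idx, jdx in zip(seq_idx, seq_idx[1:]):
--         if (idx + 1 == jdx) or (idx == jdx):
--             skip_flag = True
--         elif skip_flag:
--             skip_flag = False
--         else:
--             new_idx.append(idx)
--     return new_idx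
-- ===== SOURCE B (Python) =====
-- def _get_start_end_idx(seq_idx):
--     """Keep exactly the indices that are isolated: occur once and have no
--     value one below or one above them anywhere in the input.
--
--     Builds a count dict in one pass, then filters the sorted distinct values
--     by global membership tests instead of scanning sorted adjacent pairs.
--     """
--     counts = {}
--     for x in seq_idx:
--         counts[x] = counts.get(x, 0) + 1
--     return [x for x in sorted(counts)
--             if counts[x] == 1 and x - 1 not in counts and x + 1 not in counts]
-- ===== Notes on version B (the rewrite author's own statement) =====
-- stated objective: alternative
-- what changed: Replaces A's sorted-adjacent-pair scan with a skip flag by a count dict built in one pass plus a global-membership filter: keep x iff it occurs exactly once and neither x-1 nor x+1 is anywhere in the input, emitted over the sorted distinct values.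
import Mathlib
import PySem

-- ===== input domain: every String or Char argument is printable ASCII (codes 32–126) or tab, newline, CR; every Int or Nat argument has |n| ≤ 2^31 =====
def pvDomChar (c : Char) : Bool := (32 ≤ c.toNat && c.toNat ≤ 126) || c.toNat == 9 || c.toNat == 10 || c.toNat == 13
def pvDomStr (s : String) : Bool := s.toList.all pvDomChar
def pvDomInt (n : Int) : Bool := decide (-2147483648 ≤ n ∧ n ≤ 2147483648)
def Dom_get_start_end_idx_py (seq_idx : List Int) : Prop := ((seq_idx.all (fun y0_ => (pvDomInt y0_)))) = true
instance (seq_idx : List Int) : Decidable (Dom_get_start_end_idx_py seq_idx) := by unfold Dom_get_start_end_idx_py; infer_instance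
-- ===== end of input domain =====

-- B replaces A's sorted-adjacent-pair scan with a skip flag by a count dict plus a
-- global-membership filter over the sorted distinct values (alternative decomposition, same cost).


-- ===== PORT A =====
-- sorted(seq_idx) + [None] zipped with its tail gives the pairs
-- (x, some next) for adjacent elements plus the final (last, none);
-- we build exactly that pair list as s.zip (s.tail.map some ++ [none]).
-- Python's `idx + 1 == jdx` / `idx == jdx` with jdx possibly None is
-- `jdx = some (idx+1)` / `jdx = some idx` (int == None is False).
def get_start_end_idx_py (seq_idx : List Int) : List Int :=
  let s := PySem.List.sorted seq_idx (fun x => x) false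
  ((s.zip (s.tail.map some ++ [none])).foldl
    (fun (st : List Int × Bool) p =>
      if p.2 = some (p.1 + 1) ∨ p.2 = some p.1 then (st.1, true)
      else if st.2 = true then (st.1, false)
      else (st.1 ++ [p.1], st.2))
    ([], false)).1

-- ===== PORT B =====
-- Source B: build `counts` with d[x] = d.get(x, 0) + 1, then the comprehension
-- `[x for x in sorted(counts) if counts[x] == 1 and x-1 not in counts and x+1 not in counts]`
-- (sorted(counts) iterates the dict's keys) becomes a filter of the sorted key list.
def get_start_end_idx_py_alt (seq_idx : List Int) : List Int :=
  let counts : PySem.Dict Int Int :=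
    seq_idx.foldl (fun d x => d.insert x (d.getD x 0 + 1)) PySem.Dict.empty
  (PySem.List.sorted counts.keys (fun x => x) false).filter
    (fun x => counts.getD x 0 == 1 && !(counts.contains (x - 1)) && !(counts.contains (x + 1)))

-- ===== PRECONDITION & SPEC =====
def Spec_get_start_end_idx_py (seq_idx : List Int) (out : List Int) : Prop := out = get_start_end_idx_py_alt seq_idx
instance (seq_idx : List Int) (out : List Int) : Decidable (Spec_get_start_end_idx_py seq_idx out) := by unfold Spec_get_start_end_idx_py; infer_instance

-- ===== CLAIM (what is proved, stated in full; the proofs are below) =====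
def Claim_equal_get_start_end_idx_py : Prop := ∀ (seq_idx : List Int), Dom_get_start_end_idx_py seq_idx → Spec_get_start_end_idx_py seq_idx (get_start_end_idx_py seq_idx)

-- ===== LEMMAS AND PROOFS =====

-- "z is isolated in s": occurs exactly once and has no neighbour value in s
def pc (s : List Int) (z : Int) : Bool := decide (s.count z = 1 ∧ (z - 1) ∉ s ∧ (z + 1) ∉ s)

-- the common target: isolated elements of s, listed over s.dedup
def F (s : List Int) : List Int := s.dedup.filter (pc s)

-- recursive reformulation of A's loop (result appended after the accumulator)
def aRec : List Int → Bool → List Int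
  | [], _ => []
  | [x], flag => if flag then [] else [x]
  | x :: y :: t, flag =>
    if x + 1 = y ∨ x = y then aRec (y :: t) true
    else if flag then aRec (y :: t) false
    else x :: aRec (y :: t) flag

theorem aFold (l : List Int) : ∀ (acc : List Int) (flag : Bool),
    ((l.zip (l.tail.map some ++ [none])).foldl
      (fun (st : List Int × Bool) p =>
        if p.2 = some (p.1 + 1) ∨ p.2 = some p.1 then (st.1, true)
        else if st.2 = true then (st.1, false)
        else (st.1 ++ [p.1], st.2))
      (acc, flag)).1 = acc ++ aRec l flag := by
  induction l with
  | nil => intro acc flag; simp [aRec]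
  | cons x l ih =>
    intro acc flag
    cases l with
    | nil =>
      cases flag <;> simp [aRec, List.foldl]
    | cons y t =>
      have hz : ((x :: y :: t).zip ((x :: y :: t).tail.map some ++ [none]))
          = (x, some y) :: ((y :: t).zip ((y :: t).tail.map some ++ [none])) := by
        simp [List.zip]
      rw [hz]
      by_cases h1 : (some y : Option Int) = some (x + 1) ∨ (some y : Option Int) = some x
      · have h1' : x + 1 = y ∨ x = y := by
          rcases h1 with h | h <;> [left; right] <;> exact (Option.some_inj.mp h).symm
        simp only [List.foldl, if_pos h1, aRec, if_pos h1']
        exact ih acc true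
      · have h1' : ¬ (x + 1 = y ∨ x = y) := by
          intro h; apply h1
          rcases h with h | h <;> [left; right] <;> exact congrArg some h.symm
        cases flag with
        | true =>
          simp only [List.foldl, if_neg h1, aRec, if_neg h1']
          simpa using ih acc false
        | false =>
          simp only [List.foldl, if_neg h1, aRec, if_neg h1']
          simpa using (ih (acc ++ [x]) false)

theorem mem_F {s : List Int} {z : Int} (h : z ∈ F s) : z ∈ s := by
  have := List.mem_filter.mp h
  exact List.mem_dedup.mp this.1

-- pc over a duplicated head: same, except the duplicated value is never isolated
theorem pc_cons_dup (y : Int) (t : List Int) (z : Int) :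
    pc (y :: y :: t) z = (pc (y :: t) z && !(z == y)) := by
  by_cases hz : z = y
  · subst hz; simp [pc]
  · have hz' : ¬ (y = z) := fun h => hz h.symm
    simp [pc, hz, hz']

theorem F_cons_dup (y : Int) (t : List Int) :
    F (y :: y :: t) = (F (y :: t)).filter (fun z => !(z == y)) := by
  unfold F
  rw [List.dedup_cons_of_mem (List.mem_cons_self), List.filter_filter]
  exact List.filter_congr (fun z _ => by rw [pc_cons_dup]; rw [Bool.and_comm])

-- consing a value unrelated to z (not z itself nor a neighbour) leaves pc unchanged
theorem pc_cons_of_ne (x z : Int) (l : List Int) (h1 : ¬ (x = z))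
    (h2 : ¬ (z - 1 = x)) (h3 : ¬ (z + 1 = x)) : pc (x :: l) z = pc l z := by
  simp [pc, List.mem_cons, h1, h2, h3]

-- pc over a fresh head x with x+1 = head of the rest
theorem F_cons_adj (x y : Int) (t : List Int) (hxy : x + 1 = y)
    (hy : ∀ z ∈ t, y ≤ z) :
    F (x :: y :: t) = (F (y :: t)).filter (fun z => !(z == y)) := by
  have hnm : x ∉ y :: t := by
    intro hm; rcases List.mem_cons.mp hm with h | h
    · omega
    · have := hy x h; omega
  unfold F
  rw [List.dedup_cons_of_notMem hnm, List.filter_cons, List.filter_filter]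
  have hx : pc (x :: y :: t) x = false := by
    simp [pc]
    intro _ _; rw [hxy]; simp
  rw [hx]
  simp only [Bool.false_eq_true, if_false]
  apply List.filter_congr
  intro z hz
  have hzm : z ∈ y :: t := List.mem_dedup.mp hz
  have hzy : y ≤ z := by
    rcases List.mem_cons.mp hzm with h | h
    · omega
    · exact hy z h
  rw [Bool.and_comm]
  by_cases hzy' : z = y
  · subst hzy'
    have : pc (x :: z :: t) z = false := by
      simp [pc]; intro _ h _; exact absurd (by omega : z - 1 = x) h
    simp [this]
  · have hgt : y < z := lt_of_le_of_ne hzy (Ne.symm hzy')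
    have : pc (x :: y :: t) z = pc (y :: t) z :=
      pc_cons_of_ne x z (y :: t) (by omega) (by omega) (by omega)
    simp [this, hzy']

-- pc over a fresh head x strictly below the rest by more than one: x is isolated
theorem F_cons_gap (x y : Int) (t : List Int) (hlt : x + 1 < y)
    (hy : ∀ z ∈ t, y ≤ z) :
    F (x :: y :: t) = x :: F (y :: t) := by
  have hnm : x ∉ y :: t := by
    intro hm; rcases List.mem_cons.mp hm with h | h
    · omega
    · have := hy x h; omega
  unfold F
  rw [List.dedup_cons_of_notMem hnm, List.filter_cons]
  have hc0 : List.count x (y :: t) = 0 := List.count_eq_zero.mpr hnm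
  have hx : pc (x :: y :: t) x = true := by
    simp only [pc, decide_eq_true_eq]
    refine ⟨?_, ?_, ?_⟩
    · simp [hc0]
    · intro hm
      rcases List.mem_cons.mp hm with hh | hm2
      · omega
      · rcases List.mem_cons.mp hm2 with hh | hh
        · omega
        · have := hy _ hh; omega
    · intro hm
      rcases List.mem_cons.mp hm with hh | hm2
      · omega
      · rcases List.mem_cons.mp hm2 with hh | hh
        · omega
        · have := hy _ hh; omega
  rw [hx]
  simp only [if_true]
  congr 1
  apply List.filter_congr
  intro z hz
  have hzm : z ∈ y :: t := List.mem_dedup.mp hz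
  have hzy : y ≤ z := by
    rcases List.mem_cons.mp hzm with h | h
    · omega
    · exact hy z h
  exact pc_cons_of_ne x z (y :: t) (by omega) (by omega) (by omega)

theorem aRec_eq_F : ∀ (t : List Int) (x : Int), (x :: t).Pairwise (· ≤ ·) →
    aRec (x :: t) false = F (x :: t) ∧
    aRec (x :: t) true = (F (x :: t)).filter (fun z => !(z == x)) := by
  intro t
  induction t with
  | nil =>
    intro x _
    have hF : F [x] = [x] := by
      unfold F
      have : pc [x] x = true := by
        simp [pc]
      simp [this]
    constructor
    · simp [aRec, hF]
    · simp [aRec, hF]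
  | cons y t ih =>
    intro x h
    have hxy : x ≤ y := (List.pairwise_cons.mp h).1 _ (by simp)
    have h' : (y :: t).Pairwise (· ≤ ·) := (List.pairwise_cons.mp h).2
    have hyt : ∀ z ∈ t, y ≤ z := (List.pairwise_cons.mp h').1
    obtain ⟨ih1, ih2⟩ := ih y h'
    by_cases hadj : x + 1 = y ∨ x = y
    · have hF : F (x :: y :: t) = (F (y :: t)).filter (fun z => !(z == y)) := by
        rcases hadj with hh | hh
        · exact F_cons_adj x y t hh hyt
        · subst hh; exact F_cons_dup x t
      have hne : ∀ z ∈ (F (y :: t)).filter (fun z => !(z == y)), (!(z == x)) = true := by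
        intro z hz
        have hzf := List.mem_filter.mp hz
        have hzm : z ∈ y :: t := mem_F hzf.1
        have hzy : y ≤ z := by
          rcases List.mem_cons.mp hzm with hh | hh
          · omega
          · exact hyt z hh
        have hzny : z ≠ y := by simpa using hzf.2
        have hzx : z ≠ x := by rcases hadj with hh | hh <;> omega
        simp [hzx]
      constructor
      · simp only [aRec, if_pos hadj]
        rw [ih2, hF]
      · simp only [aRec, if_pos hadj]
        rw [ih2, hF, List.filter_eq_self.mpr hne]
    · have hgap : x + 1 < y := by
        obtain ⟨h1, h2⟩ := not_or.mp hadj; omega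
      have hF : F (x :: y :: t) = x :: F (y :: t) := F_cons_gap x y t hgap hyt
      have hfs : (F (y :: t)).filter (fun z => !(z == x)) = F (y :: t) := by
        apply List.filter_eq_self.mpr
        intro z hz
        have hzm : z ∈ y :: t := mem_F hz
        have hzy : y ≤ z := by
          rcases List.mem_cons.mp hzm with hh | hh
          · omega
          · exact hyt z hh
        have hzx : z ≠ x := by omega
        simp [hzx]
      constructor
      · simp only [aRec, if_neg hadj, Bool.false_eq_true, if_false]
        rw [ih1, hF]
      · simp only [aRec, if_neg hadj, if_true]
        rw [ih1, hF, List.filter_cons]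
        simp only [beq_self_eq_true, Bool.not_true, Bool.false_eq_true, if_false]
        rw [hfs]

-- B's filter predicate, after the counter lemmas, is pc seq_idx
theorem b_pred_eq (seq_idx : List Int) (z : Int) :
    ((((seq_idx.count z : Int)) == 1) && !(seq_idx.contains (z - 1)) && !(seq_idx.contains (z + 1)))
      = pc seq_idx z := by
  rw [Bool.eq_iff_iff]
  simp [pc, Nat.cast_eq_one, and_assoc]

-- sorted(set(xs)) is the dedup of sorted(xs)
theorem sorted_set_eq_dedup_sorted (seq_idx : List Int) :
    PySem.List.sorted (PySem.Set.ofList seq_idx) (fun x => x) false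
      = (PySem.List.sorted seq_idx (fun x => x) false).dedup := by
  apply PySem.List.sorted_id_eq_of_perm_of_pairwise
  · rw [List.perm_ext_iff_of_nodup (List.nodup_dedup _) (PySem.Set.nodup_ofList _)]
    intro a
    rw [List.mem_dedup, PySem.Set.mem_ofList, PySem.List.mem_sorted]
  · exact List.Pairwise.sublist (List.dedup_sublist _) (PySem.List.sorted_pairwise seq_idx (fun x => x))

-- ===== VERDICT (by name: the statement is the Claim_ definition above) =====
theorem get_start_end_idx_py_spec : Claim_equal_get_start_end_idx_py := by
  intro seq_idx _
  unfold Spec_get_start_end_idx_py get_start_end_idx_py get_start_end_idx_py_alt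
  simp only [PySem.Dict.foldl_insert_getD_add_one_eq_counter, PySem.Dict.keys_counter,
    PySem.Dict.getD_counter, PySem.Dict.contains_counter]
  rw [sorted_set_eq_dedup_sorted]
  have hpred : ((PySem.List.sorted seq_idx (fun x => x) false).dedup).filter
      (fun x => (((seq_idx.count x : Int)) == 1) && !(seq_idx.contains (x - 1)) && !(seq_idx.contains (x + 1)))
      = ((PySem.List.sorted seq_idx (fun x => x) false).dedup).filter (pc seq_idx) := by
    exact List.filter_congr (fun z _ => b_pred_eq seq_idx z)
  rw [hpred]
  have hperm : (PySem.List.sorted seq_idx (fun x => x) false).Perm seq_idx :=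
    PySem.List.sorted_perm seq_idx (fun x => x) false
  have hpc : ∀ z, pc (PySem.List.sorted seq_idx (fun x => x) false) z = pc seq_idx z := by
    intro z
    simp only [pc, hperm.count_eq, hperm.mem_iff]
  cases hs : PySem.List.sorted seq_idx (fun x => x) false with
  | nil => simp
  | cons x rest =>
    rw [aFold (x :: rest) [] false]
    have hpw : (x :: rest).Pairwise (· ≤ ·) := by
      rw [← hs]; exact PySem.List.sorted_pairwise seq_idx (fun x => x)
    rw [List.nil_append, (aRec_eq_F rest x hpw).1]
    unfold F
    exact List.filter_congr (fun z _ => by rw [← hs, hpc])
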